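-- pv_equiv track=rewrite | github.com/niki-johnson/Python | Codewars/direction_reduction.py | remover_dir
-- ===== SOURCE A (Python) =====
-- def remover_dir(coordenadas):
--
--     flag_coord = []
--     for i in range(len(coordenadas) - 1):
--         if coordenadas[i] + coordenadas[i+1] == 0:
--             flag_coord.append(i)
--             flag_coord.append(i+1)
--             break
--
--     new_coord = []
--     for i in range(len(coordenadas)):
--         if i in flag_coord:
--             continue
--         else:
--             new_coord.append(coordenadas[i])
--
--     if len(coordenadas) == len(new_coord):
--         return new_coord
--
--     elif len(new_coord) == 1:
--         return new_coord
--
--     else: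
--         return remover_dir(new_coord)
-- ===== SOURCE B (Python) =====
-- def remover_dir(coordenadas):
--     stack = []
--     for x in coordenadas:
--         if stack and stack[-1] + x == 0:
--             stack.pop()
--         else:
--             stack.append(x)
--     return stack
-- ===== Notes on version B (the rewrite author's own statement) =====
-- stated objective: alternative
-- what changed: Replaces A's repeated scan-remove-first-cancelling-pair-and-recurse with a single left-to-right pass maintaining a stack that pops when the new element cancels the top (the reduction is confluent, so the normal form is the same).
import Mathlib
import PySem

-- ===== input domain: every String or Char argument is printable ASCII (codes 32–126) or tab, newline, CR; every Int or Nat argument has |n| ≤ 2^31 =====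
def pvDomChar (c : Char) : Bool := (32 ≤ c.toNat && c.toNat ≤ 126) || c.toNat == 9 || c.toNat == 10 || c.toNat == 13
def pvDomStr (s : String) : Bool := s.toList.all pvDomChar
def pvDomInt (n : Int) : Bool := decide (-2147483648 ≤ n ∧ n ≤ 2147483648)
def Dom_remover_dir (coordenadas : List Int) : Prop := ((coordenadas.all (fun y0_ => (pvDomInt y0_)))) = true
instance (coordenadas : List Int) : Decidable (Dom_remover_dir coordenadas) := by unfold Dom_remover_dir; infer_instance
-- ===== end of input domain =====

-- B replaces A's repeated scan-remove-first-cancelling-pair-then-recurse with one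
-- stack pass (pop when the new element cancels the top); objective: alternative single-pass algorithm.

-- ===== PORT A =====
-- first loop of A: for i in range(len-1): if xs[i]+xs[i+1]==0: append i, i+1; break
def pvFlagLoop (xs : List Int) (i : Nat) : List Nat :=
  if h : i + 1 < xs.length then
    if xs[i]'(by omega) + xs[i+1]'h = 0 then [i, i + 1]
    else pvFlagLoop xs (i + 1)
  else []
termination_by xs.length - i

-- second loop of A: for i in range(len): if i in flags: continue else append xs[i]
def pvNewLoop (xs : List Int) (flags : List Nat) (i : Nat) : List Int :=
  if h : i < xs.length then
    (if i ∈ flags then [] else [xs[i]]) ++ pvNewLoop xs flags (i + 1)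
  else []
termination_by xs.length - i

-- needed by remover_dir's termination proof (cited in its decreasing_by)
theorem pvNewLoop_length_le (xs : List Int) (flags : List Nat) : ∀ i,
    (pvNewLoop xs flags i).length ≤ xs.length - i := by
  intro i
  induction i using pvNewLoop.induct (xs := xs) with
  | case1 i h ih =>
    rw [pvNewLoop]
    simp only [h, dite_true, List.length_append]
    split <;> simp <;> omega
  | case2 i h => rw [pvNewLoop]; simp [h]

def remover_dir (coordenadas : List Int) : List Int :=
  let flag_coord := pvFlagLoop coordenadas 0
  let new_coord := pvNewLoop coordenadas flag_coord 0
  if coordenadas.length = new_coord.length then new_coord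
  else if new_coord.length = 1 then new_coord
  else remover_dir new_coord
termination_by coordenadas.length
decreasing_by
  have := pvNewLoop_length_le coordenadas (pvFlagLoop coordenadas 0) 0
  simp only [flag_coord, new_coord] at *
  omega

-- ===== PORT B =====
-- the body of B's for-loop; the Lean stack is kept top-first (Python's stack[-1] is
-- the head here), so the final stack is returned reversed
def pvStep (stack : List Int) (x : Int) : List Int :=
  match stack with
  | t :: r => if t + x = 0 then r else x :: t :: r
  | [] => [x]

def remover_dir_alt (coordenadas : List Int) : List Int :=
  (coordenadas.foldl pvStep []).reverse

-- ===== PRECONDITION & SPEC =====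
def Spec_remover_dir (coordenadas : List Int) (out : List Int) : Prop := out = remover_dir_alt coordenadas
instance (coordenadas : List Int) (out : List Int) : Decidable (Spec_remover_dir coordenadas out) := by unfold Spec_remover_dir; infer_instance

-- ===== CLAIM (what is proved, stated in full; the proofs are below) =====
def Claim_equal_remover_dir : Prop := ∀ (coordenadas : List Int), Dom_remover_dir coordenadas → Spec_remover_dir coordenadas (remover_dir coordenadas)

-- ===== LEMMAS AND PROOFS =====

-- "reduced": no two adjacent elements cancel
def pvRed (l : List Int) : Prop := List.IsChain (fun a b => a + b ≠ 0) l

theorem pvRed_step {s : List Int} (x : Int) (h : pvRed s) : pvRed (pvStep s x) := by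
  unfold pvRed at *
  match s with
  | [] => simp [pvStep]
  | t :: r =>
    simp only [pvStep]
    split
    · exact h.of_cons
    · exact List.IsChain.cons h (by simp; omega)

theorem pvRed_run {s : List Int} (xs : List Int) (h : pvRed s) :
    pvRed (xs.foldl pvStep s) := by
  induction xs generalizing s with
  | nil => exact h
  | cons x xs ih => exact ih (pvRed_step x h)

theorem pvStep_step {s : List Int} {a b : Int} (hab : a + b = 0) (h : pvRed s) :
    pvStep (pvStep s a) b = s := by
  match s with
  | [] => simp [pvStep, hab]
  | c :: r =>
    by_cases hca : c + a = 0
    · rw [show pvStep (c :: r) a = r by simp [pvStep, hca]]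
      match r with
      | [] =>
        show [b] = [c]
        have : b = c := by omega
        rw [this]
      | d :: r' =>
        have hcd : c + d ≠ 0 := h.rel
        have hdb : d + b ≠ 0 := by omega
        rw [show pvStep (d :: r') b = b :: d :: r' by simp [pvStep, hdb]]
        have : b = c := by omega
        rw [this]
    · rw [show pvStep (c :: r) a = a :: c :: r by simp [pvStep, hca]]
      simp [pvStep, hab]

theorem pvRun_remove {a b : Int} (hab : a + b = 0) (u v : List Int) :
    (u ++ a :: b :: v).foldl pvStep [] = (u ++ v).foldl pvStep [] := by
  rw [List.foldl_append, List.foldl_append]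
  show List.foldl pvStep (pvStep (pvStep (u.foldl pvStep []) a) b) v = _
  rw [pvStep_step hab (pvRed_run u (by simp [pvRed]))]

theorem pvRun_red : ∀ (xs s : List Int), pvRed (xs.reverse ++ s) →
    xs.foldl pvStep s = xs.reverse ++ s := by
  intro xs
  induction xs with
  | nil => intro s _; simp
  | cons x rest ih =>
    intro s h
    have h' : pvRed (rest.reverse ++ (x :: s)) := by simpa using h
    have hstep : pvStep s x = x :: s := by
      match s with
      | [] => simp [pvStep]
      | c :: r =>
        have hx : pvRed (x :: c :: r) := List.IsChain.right_of_append h'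
        have hxc : x + c ≠ 0 := hx.rel
        simp [pvStep, show c + x ≠ 0 by omega]
    simp only [List.foldl_cons, hstep]
    rw [ih (x :: s) h']
    simp

-- characterisation of A's first loop: it finds no pair at all, or some cancelling pair
theorem pvFlagLoop_spec (xs : List Int) : ∀ i,
    (pvFlagLoop xs i = [] ∧ ∀ j, i ≤ j → (h : j + 1 < xs.length) →
        xs[j]'(by omega) + xs[j+1]'h ≠ 0) ∨
    (∃ j, ∃ (h : j + 1 < xs.length), xs[j]'(by omega) + xs[j+1]'h = 0 ∧
        pvFlagLoop xs i = [j, j + 1]) := by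
  intro i
  induction i using pvFlagLoop.induct (xs := xs) with
  | case1 i h hz =>
    right; exact ⟨i, h, hz, by rw [pvFlagLoop]; simp [h, hz]⟩
  | case2 i h hz ih =>
    rcases ih with ⟨hnil, hall⟩ | hfound
    · left
      refine ⟨by rw [pvFlagLoop]; simp [h, hz, hnil], ?_⟩
      intro j hij hj
      rcases Nat.eq_or_lt_of_le hij with rfl | hlt
      · exact hz
      · exact hall j hlt hj
    · rcases hfound with ⟨j, hj, hzj, heq⟩
      right; exact ⟨j, hj, hzj, by rw [pvFlagLoop]; simp [h, hz, heq]⟩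
  | case3 i h =>
    left
    refine ⟨by rw [pvFlagLoop]; simp [h], ?_⟩
    intro j hij hj
    omega

theorem pvNewLoop_nil (xs : List Int) : ∀ i, pvNewLoop xs [] i = xs.drop i := by
  intro i
  induction i using pvNewLoop.induct (xs := xs) with
  | case1 i h ih =>
    rw [pvNewLoop]
    simp only [h, dite_true, List.not_mem_nil, if_false, ih]
    rw [List.drop_eq_getElem_cons h]
    simp
  | case2 i h =>
    have hd : xs.drop i = [] := List.drop_eq_nil_of_le (by omega)
    rw [pvNewLoop]; simp [h, hd]

theorem pvNewLoop_past (xs : List Int) (j : Nat) : ∀ i, j + 1 < i →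
    pvNewLoop xs [j, j + 1] i = xs.drop i := by
  intro i
  induction i using pvNewLoop.induct (xs := xs) with
  | case1 i h ih =>
    intro hi
    have hmem : i ∉ [j, j + 1] := by simp; omega
    rw [pvNewLoop]
    simp only [h, dite_true, if_neg hmem, ih (by omega)]
    rw [List.drop_eq_getElem_cons h]
    simp
  | case2 i h =>
    intro hi
    have hd : xs.drop i = [] := List.drop_eq_nil_of_le (by omega)
    rw [pvNewLoop]; simp [h, hd]

theorem pvNewLoop_pair (xs : List Int) (j : Nat) (hj : j + 1 < xs.length) : ∀ i, i ≤ j →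
    pvNewLoop xs [j, j + 1] i = (xs.drop i).take (j - i) ++ xs.drop (j + 2) := by
  intro i
  induction i using pvNewLoop.induct (xs := xs) with
  | case1 i h ih =>
    intro hij
    rcases Nat.eq_or_lt_of_le hij with rfl | hlt
    · -- i = j: skip index j, skip index j+1, then copy the rest
      rw [pvNewLoop]
      simp only [h, dite_true, if_pos (by simp : i ∈ [i, i + 1]), List.nil_append]
      rw [pvNewLoop]
      simp only [hj, dite_true, if_pos (by simp : i + 1 ∈ [i, i + 1]), List.nil_append]
      rw [pvNewLoop_past xs i (i + 2) (by omega)]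
      simp
    · have hmem : i ∉ [j, j + 1] := by simp; omega
      rw [pvNewLoop]
      simp only [h, dite_true, if_neg hmem, ih hlt]
      rw [show j - i = (j - (i + 1)) + 1 by omega, List.drop_eq_getElem_cons h,
        List.take_succ_cons]
      simp
  | case2 i h => intro hij; omega

theorem pvTake_drop_split (xs : List Int) (j : Nat) (hj : j + 1 < xs.length) :
    xs = xs.take j ++ xs[j]'(by omega) :: xs[j+1]'hj :: xs.drop (j + 2) := by
  conv_lhs => rw [← List.take_append_drop j xs]
  rw [List.drop_eq_getElem_cons (show j < xs.length by omega),
      List.drop_eq_getElem_cons hj]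

theorem remover_dir_eq_stack : ∀ (xs : List Int),
    remover_dir xs = (xs.foldl pvStep []).reverse := by
  have main : ∀ n (xs : List Int), xs.length ≤ n →
      remover_dir xs = (xs.foldl pvStep []).reverse := by
    intro n
    induction n with
    | zero =>
      intro xs hlen
      have : xs = [] := List.eq_nil_of_length_eq_zero (by omega)
      subst this
      rw [remover_dir]
      have h1 : pvNewLoop [] (pvFlagLoop [] 0) 0 = [] := by rw [pvNewLoop]; simp
      simp [h1]
    | succ n ih =>
      intro xs hlen
      rcases pvFlagLoop_spec xs 0 with ⟨hnil, hall⟩ | ⟨j, hj, hzj, heq⟩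
      · -- no cancelling pair: A returns xs unchanged, and the stack run keeps xs
        have hred : pvRed xs := by
          rw [pvRed, List.isChain_iff_getElem]
          intro i hi
          exact hall i (Nat.zero_le i) hi
        have hrun : xs.foldl pvStep [] = xs.reverse := by
          have h0 := pvRun_red xs []
          simp only [List.append_nil] at h0
          refine h0 ?_
          rw [pvRed, List.isChain_reverse]
          exact hred.imp (fun {a b} hab => by dsimp at *; omega)
        rw [remover_dir]
        simp [hnil, pvNewLoop_nil xs 0, hrun]
      · -- a first cancelling pair at j: A removes it and recurses (or returns)
        have hnew : pvNewLoop xs (pvFlagLoop xs 0) 0 = xs.take j ++ xs.drop (j + 2) := by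
          rw [heq, pvNewLoop_pair xs j hj 0 (Nat.zero_le j)]
          simp
        have hlen_new : (xs.take j ++ xs.drop (j + 2)).length = xs.length - 2 := by
          rw [List.length_append, List.length_take, List.length_drop]; omega
        have hne : ¬ xs.length = (xs.take j ++ xs.drop (j + 2)).length := by omega
        have hrunEq : xs.foldl pvStep [] = (xs.take j ++ xs.drop (j + 2)).foldl pvStep [] := by
          conv_lhs => rw [pvTake_drop_split xs j hj]
          exact pvRun_remove hzj _ _
        rw [remover_dir]
        simp only [hnew, if_neg hne]
        by_cases h1 : (xs.take j ++ xs.drop (j + 2)).length = 1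
        · rw [if_pos h1]
          obtain ⟨c, hc⟩ := List.length_eq_one_iff.mp h1
          rw [hrunEq, hc]
          rfl
        · rw [if_neg h1]
          rw [ih _ (by omega), hrunEq]
  intro xs
  exact main xs.length xs (le_refl _)

-- ===== VERDICT (by name: the statement is the Claim_ definition above) =====
theorem remover_dir_spec : Claim_equal_remover_dir := by
  intro xs _
  unfold Spec_remover_dir remover_dir_alt
  exact remover_dir_eq_stack xs
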